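-- pv_equiv track=rewrite | github.com/RED2916/Learning_Python | worst_case.py | worst_case
-- ===== SOURCE A (Python) =====
-- from collections import deque
--
-- def worst_case(n):
--     lines = []
--     lines.append("# Random instance for Gale-Shapley, n = 5 \n")
--     lines.append("# \n")
--     lines.append("n = {} \n".format(n))
--     lines.append("# \n")
--     men = deque()
--     women = deque()
--
--     for i in range(1, 2 * n + 1):
--         if i % 2 == 0:
--             women.append(str(i))
--         else:
--             men.append(str(i))
--
--     men.rotate(-1)
--     for i in range(1, 2* n + 1):
--
--         if i % 2 == 0:
--             line = "{}:".format(i)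
--             for x in men:
--                 line = line + " " + x
--
--             men.rotate(1)
--             final_line = line + "\n"
--             lines.append(final_line)
--
--         else:
--             line = "{}:".format(i)
--             for x in women:
--                 line = line + " " + x
--
--             women.rotate(-1)
--             final_line = line + "\n"
--             lines.append(final_line)
--
--     return lines
-- ===== SOURCE B (Python) =====
-- def worst_case(n):
--     lines = ["# Random instance for Gale-Shapley, n = 5 \n",
--              "# \n",
--              "n = {} \n".format(n),
--              "# \n"]
--     men = [str(2 * j + 1) for j in range(n)]
--     women = [str(2 * j + 2) for j in range(n)]
--     for k in range(n):
--         m = (1 - k) % n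
--         line1 = "{}:".format(2 * k + 1)
--         for x in women[k:] + women[:k]:
--             line1 = line1 + " " + x
--         line2 = "{}:".format(2 * k + 2)
--         for x in men[m:] + men[:m]:
--             line2 = line2 + " " + x
--         lines.append(line1 + "\n")
--         lines.append(line2 + "\n")
--     return lines
-- ===== Notes on version B (the rewrite author's own statement) =====
-- stated objective: simpler
-- what changed: Replaced the deques with incremental rotate state and the parity-tested 2n-iteration loop by base lists built directly from range(n) and a single loop over the n line-pairs, each rotation obtained in closed form by slicing at a computed offset (k for women, (1-k)%n for men).
import Mathlib
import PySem

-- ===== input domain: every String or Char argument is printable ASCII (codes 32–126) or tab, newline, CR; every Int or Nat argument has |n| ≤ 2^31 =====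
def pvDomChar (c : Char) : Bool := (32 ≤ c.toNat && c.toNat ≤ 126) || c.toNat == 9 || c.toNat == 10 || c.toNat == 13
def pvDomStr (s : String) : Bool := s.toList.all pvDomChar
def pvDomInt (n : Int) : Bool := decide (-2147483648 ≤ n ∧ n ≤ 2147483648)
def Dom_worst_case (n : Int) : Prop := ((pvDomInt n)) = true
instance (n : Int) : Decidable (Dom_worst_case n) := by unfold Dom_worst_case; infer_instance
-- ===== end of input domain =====

-- B replaces the deques-with-rotation state by base lists and closed-form slice offsets; objective: simpler.

-- ===== PORT A =====
-- deque.rotate(-1): first element moves to the back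
def wcRotL (xs : List String) : List String :=
  match xs with
  | [] => []
  | x :: t => t ++ [x]

-- deque.rotate(1): last element moves to the front
def wcRotR (xs : List String) : List String :=
  (wcRotL xs.reverse).reverse

-- 'for x in names: line = line + " " + x'
def wcJoin (pre : String) (names : List String) : String :=
  names.foldl (fun l x => l ++ " " ++ x) pre

-- body of A's first loop: parity-dispatched append to (men, women)
def wcBuild (mw : List String × List String) (i : Int) : List String × List String :=
  if PySem.Int.mod i 2 = 0 then (mw.1, mw.2 ++ [PySem.Int.toStr i])
  else (mw.1 ++ [PySem.Int.toStr i], mw.2)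

-- body of A's second loop over state (men, women, lines)
def wcStep (st : List String × List String × List String) (i : Int) :
    List String × List String × List String :=
  if PySem.Int.mod i 2 = 0 then
    (wcRotR st.1, st.2.1, st.2.2 ++ [wcJoin (PySem.Int.toStr i ++ ":") st.1 ++ "\n"])
  else
    (st.1, wcRotL st.2.1, st.2.2 ++ [wcJoin (PySem.Int.toStr i ++ ":") st.2.1 ++ "\n"])

def worst_case (n : Int) : List String :=
  let lines : List String :=
    ["# Random instance for Gale-Shapley, n = 5 \n", "# \n",
     "n = " ++ PySem.Int.toStr n ++ " \n", "# \n"]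
  let mw := (PySem.List.pyRange 1 (2 * n + 1) 1).foldl wcBuild ([], [])
  let men := wcRotL mw.1
  let st := (PySem.List.pyRange 1 (2 * n + 1) 1).foldl wcStep (men, mw.2, lines)
  st.2.2

-- ===== PORT B =====
def worst_case_alt (n : Int) : List String :=
  let lines : List String :=
    ["# Random instance for Gale-Shapley, n = 5 \n", "# \n",
     "n = " ++ PySem.Int.toStr n ++ " \n", "# \n"]
  let men := (PySem.List.pyRange 0 n 1).map (fun j => PySem.Int.toStr (2 * j + 1))
  let women := (PySem.List.pyRange 0 n 1).map (fun j => PySem.Int.toStr (2 * j + 2))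
  (PySem.List.pyRange 0 n 1).foldl (fun acc k =>
    let m := PySem.Int.mod (1 - k) n
    let line1 := wcJoin (PySem.Int.toStr (2 * k + 1) ++ ":")
      (PySem.List.slice women (some k) none ++ PySem.List.slice women none (some k))
    let line2 := wcJoin (PySem.Int.toStr (2 * k + 2) ++ ":")
      (PySem.List.slice men (some m) none ++ PySem.List.slice men none (some m))
    acc ++ [line1 ++ "\n", line2 ++ "\n"]) lines

-- ===== PRECONDITION & SPEC =====
def Spec_worst_case (n : Int) (out : List String) : Prop := out = worst_case_alt n
instance (n : Int) (out : List String) : Decidable (Spec_worst_case n out) := by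
  unfold Spec_worst_case; infer_instance

-- ===== CLAIM (what is proved, stated in full; the proofs are below) =====
def Claim_equal_worst_case : Prop := ∀ (n : Int), Dom_worst_case n → Spec_worst_case n (worst_case n)

-- ===== LEMMAS AND PROOFS =====

theorem wcRotL_eq_rotate (xs : List String) : wcRotL xs = xs.rotate 1 := by
  cases xs with
  | nil => rfl
  | cons x t => simp [wcRotL, List.rotate_cons_succ]

theorem wcRotR_snoc (l : List String) (a : String) : wcRotR (l ++ [a]) = a :: l := by
  simp [wcRotR, wcRotL]

theorem rotate_snoc (l : List String) (a : String) :
    (l ++ [a]).rotate l.length = a :: l := by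
  rw [List.rotate_eq_drop_append_take (by simp)]
  rw [List.drop_left, List.take_left]
  rfl

theorem wcRotR_eq_rotate (xs : List String) (h : xs ≠ []) :
    wcRotR xs = xs.rotate (xs.length - 1) := by
  obtain ⟨l, a, rfl⟩ : ∃ l a, xs = l ++ [a] :=
    ⟨xs.dropLast, xs.getLast h, (List.dropLast_append_getLast h).symm⟩
  rw [wcRotR_snoc, ← rotate_snoc]
  congr 1
  simp

theorem wcRotL_iterate (xs : List String) (j : Nat) :
    wcRotL^[j] xs = xs.rotate j := by
  induction j with
  | zero => simp
  | succ j ih =>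
      rw [Function.iterate_succ_apply', ih, wcRotL_eq_rotate, List.rotate_rotate]

theorem wcRotR_iterate (xs : List String) (j : Nat) (h : xs ≠ []) :
    wcRotR^[j] (xs.rotate 1) = xs.rotate (1 + j * (xs.length - 1)) := by
  induction j with
  | zero => simp
  | succ j ih =>
      have hne : xs.rotate (1 + j * (xs.length - 1)) ≠ [] := by
        simpa [List.rotate_eq_nil_iff] using h
      rw [Function.iterate_succ_apply', ih, wcRotR_eq_rotate _ hne,
          List.length_rotate, List.rotate_rotate]
      congr 1
      have hc : ∀ c : Nat, 1 + j * c + c = 1 + (j + 1) * c := by intro c; ring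
      exact hc _

theorem wcBuild_odd (a w : List String) (i : Int) (h : PySem.Int.mod i 2 = 1) :
    wcBuild (a, w) i = (a ++ [PySem.Int.toStr i], w) := by
  unfold wcBuild
  rw [if_neg (by rw [h]; omega)]

theorem wcBuild_even (a w : List String) (i : Int) (h : PySem.Int.mod i 2 = 0) :
    wcBuild (a, w) i = (a, w ++ [PySem.Int.toStr i]) := by
  unfold wcBuild
  rw [if_pos h]

theorem wcStep_odd (mn wom lin : List String) (i : Int) (h : PySem.Int.mod i 2 = 1) :
    wcStep (mn, wom, lin) i
      = (mn, wcRotL wom, lin ++ [wcJoin (PySem.Int.toStr i ++ ":") wom ++ "\n"]) := by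
  unfold wcStep
  rw [if_neg (by rw [h]; omega)]

theorem wcStep_even (mn wom lin : List String) (i : Int) (h : PySem.Int.mod i 2 = 0) :
    wcStep (mn, wom, lin) i
      = (wcRotR mn, wom, lin ++ [wcJoin (PySem.Int.toStr i ++ ":") mn ++ "\n"]) := by
  unfold wcStep
  rw [if_pos h]

theorem wcBuild_fold (m : Nat) (a w : List String) :
    ((List.range (2 * m)).map (fun k : Nat => (1 : Int) + k)).foldl wcBuild (a, w)
    = (a ++ (List.range m).map (fun j : Nat => PySem.Int.toStr (2 * (j : Int) + 1)),
       w ++ (List.range m).map (fun j : Nat => PySem.Int.toStr (2 * (j : Int) + 2))) := by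
  induction m with
  | zero => simp
  | succ m ih =>
      rw [show 2 * (m + 1) = (2 * m + 1) + 1 by omega, List.range_succ, List.range_succ,
          List.map_append, List.map_append, List.foldl_append, List.foldl_append, ih]
      simp only [List.map_cons, List.map_nil, List.foldl_cons, List.foldl_nil]
      rw [wcBuild_even _ _ _ (by rw [PySem.Int.mod_eq_emod_of_pos (by omega)]; omega),
          wcBuild_odd _ _ _ (by rw [PySem.Int.mod_eq_emod_of_pos (by omega)]; omega)]
      rw [show (1 + ((2 * m : Nat) : Int)) = 2 * (m : Int) + 1 by push_cast; ring,
          show (1 + ((2 * m + 1 : Nat) : Int)) = 2 * (m : Int) + 2 by push_cast; ring]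
      rw [List.range_succ, List.map_append, List.map_append]
      simp [List.append_assoc]

theorem wcStep_fold (m : Nat) (a w L : List String) :
    ((List.range (2 * m)).map (fun k : Nat => (1 : Int) + k)).foldl wcStep (a, w, L)
    = (wcRotR^[m] a, wcRotL^[m] w,
       L ++ (List.range m).flatMap (fun j : Nat =>
         [wcJoin (PySem.Int.toStr (2 * (j : Int) + 1) ++ ":") (wcRotL^[j] w) ++ "\n",
          wcJoin (PySem.Int.toStr (2 * (j : Int) + 2) ++ ":") (wcRotR^[j] a) ++ "\n"])) := by
  induction m with
  | zero => simp
  | succ m ih =>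
      rw [show 2 * (m + 1) = (2 * m + 1) + 1 by omega, List.range_succ, List.range_succ,
          List.map_append, List.map_append, List.foldl_append, List.foldl_append, ih]
      simp only [List.map_cons, List.map_nil, List.foldl_cons, List.foldl_nil]
      rw [wcStep_even _ _ _ _ (by rw [PySem.Int.mod_eq_emod_of_pos (by omega)]; omega),
          wcStep_odd _ _ _ _ (by rw [PySem.Int.mod_eq_emod_of_pos (by omega)]; omega)]
      rw [show (1 + ((2 * m : Nat) : Int)) = 2 * (m : Int) + 1 by push_cast; ring,
          show (1 + ((2 * m + 1 : Nat) : Int)) = 2 * (m : Int) + 2 by push_cast; ring]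
      rw [List.range_succ, Function.iterate_succ_apply', Function.iterate_succ_apply']
      simp [List.flatMap_append, List.append_assoc]

theorem wc_off (c j : Nat) :
    (PySem.Int.mod (1 - (j : Int)) ((c : Int) + 1)).toNat = (1 + j * c) % (c + 1) := by
  rw [PySem.Int.mod_eq_emod_of_pos (by omega)]
  have e : (1 - (j : Int)) + ((c : Int) + 1) * (j : Int) = ((1 + j * c : Nat) : Int) := by
    push_cast; ring
  rw [← Int.add_mul_emod_self_left (a := 1 - (j : Int)) (b := (c : Int) + 1) (c := (j : Int)), e]
  rw [show ((c : Int) + 1) = ((c + 1 : Nat) : Int) by push_cast; ring, ← Int.natCast_mod]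
  exact Int.toNat_natCast _

theorem wc_men (xs : List String) (j : Nat) (h : xs ≠ []) :
    wcRotR^[j] (wcRotL xs)
      = xs.drop ((PySem.Int.mod (1 - (j : Int)) (xs.length : Int)).toNat)
        ++ xs.take ((PySem.Int.mod (1 - (j : Int)) (xs.length : Int)).toNat) := by
  obtain ⟨c, hc⟩ : ∃ c, xs.length = c + 1 := by
    cases xs with
    | nil => exact absurd rfl h
    | cons x t => exact ⟨t.length, by simp⟩
  rw [wcRotL_eq_rotate, wcRotR_iterate xs j h, hc]
  rw [show ((c + 1 : Nat) : Int) = (c : Int) + 1 by push_cast; ring]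
  rw [wc_off c j]
  have hmod : (1 + j * c) % (c + 1) ≤ xs.length := by
    have := Nat.mod_lt (1 + j * c) (y := c + 1) (by omega)
    omega
  rw [Nat.add_sub_cancel, ← List.rotate_mod, hc,
      List.rotate_eq_drop_append_take (by omega)]

theorem wc_women (xs : List String) (j : Nat) (hj : j ≤ xs.length) :
    wcRotL^[j] xs = xs.drop j ++ xs.take j := by
  rw [wcRotL_iterate, List.rotate_eq_drop_append_take hj]

-- ===== VERDICT (by name: the statement is the Claim_ definition above) =====
theorem worst_case_spec : Claim_equal_worst_case := by
  intro n _
  unfold Spec_worst_case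
  by_cases hn : n ≤ 0
  · have h1 : PySem.List.pyRange 1 (2 * n + 1) 1 = [] :=
      PySem.List.pyRange_one_eq_nil (by omega)
    have h0 : PySem.List.pyRange 0 n 1 = [] :=
      PySem.List.pyRange_one_eq_nil (by omega)
    simp [worst_case, worst_case_alt, h1, h0]
  · have hn' : 0 < n := by omega
    obtain ⟨N, rfl⟩ : ∃ N : Nat, n = (N : Int) :=
      ⟨n.toNat, (Int.toNat_of_nonneg (by omega)).symm⟩
    have hN : 0 < N := by exact_mod_cast hn'
    have hr : PySem.List.pyRange 1 (2 * (N : Int) + 1) 1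
        = (List.range (2 * N)).map (fun k : Nat => (1 : Int) + k) := by
      rw [PySem.List.pyRange_one,
          show (2 * (N : Int) + 1 - 1).toNat = 2 * N by omega]
    simp only [worst_case, worst_case_alt]
    rw [hr, PySem.List.pyRange_zero_nat N, wcBuild_fold]
    simp only [List.nil_append]
    rw [wcStep_fold]
    simp only [List.foldl_map, List.map_map, Function.comp_def]
    rw [PySem.List.foldl_append_eq_flatMap]
    refine congrArg _ ?_
    rw [List.flatMap_def, List.flatMap_def]
    refine congrArg List.flatten (List.map_congr_left ?_)
    intro j hj
    rw [List.mem_range] at hj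
    set M0 := (List.range N).map (fun j : Nat => PySem.Int.toStr (2 * (j : Int) + 1)) with hM0
    set W0 := (List.range N).map (fun j : Nat => PySem.Int.toStr (2 * (j : Int) + 2)) with hW0
    have hMlen : M0.length = N := by simp [hM0]
    have hWlen : W0.length = N := by simp [hW0]
    have hMne : M0 ≠ [] := by
      intro hc; rw [hc] at hMlen; simp at hMlen; omega
    have hw : wcRotL^[j] W0
        = PySem.List.slice W0 (some (j : Int)) none
          ++ PySem.List.slice W0 none (some (j : Int)) := by
      rw [PySem.List.slice_from_natCast, PySem.List.slice_to_natCast,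
          wc_women _ _ (by omega)]
    have h0m : 0 ≤ PySem.Int.mod (1 - (j : Int)) (N : Int) :=
      PySem.Int.mod_nonneg _ (by exact_mod_cast hN)
    have hm : wcRotR^[j] (wcRotL M0)
        = PySem.List.slice M0 (some (PySem.Int.mod (1 - (j : Int)) (N : Int))) none
          ++ PySem.List.slice M0 none (some (PySem.Int.mod (1 - (j : Int)) (N : Int))) := by
      rw [PySem.List.slice_from _ h0m, PySem.List.slice_to _ h0m, wc_men _ _ hMne, hMlen]
    rw [hw, hm]
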